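-- pv_equiv track=rewrite | github.com/Chohongjae/chohongjae.github.io | docs/Algorithm/프로그래머스/최고의집합.py | solution
-- ===== SOURCE A (Python) =====
-- def solution(n, s):
--     if n > s:
--         return [-1]
--     else:
--         div = int(s / n)
--         mod = s % n
--         result = [div] * n
--         if mod == 0:
--             return result
--         else:
--             for i in range(1, mod + 1):
--                 result[len(result) - i] += 1
--             return result
-- ===== SOURCE B (Python) =====
-- def solution(n, s):
--     if n > s:
--         return [-1]
--     result = []
--     k, t = n, s
--     while k > 0:
--         q = t // k
--         result.append(q)
--         t -= q
--         k -= 1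
--     return result
-- ===== Notes on version B (the rewrite author's own statement) =====
-- stated objective: alternative
-- what changed: Replaced the build-uniform-list-then-increment-the-last-mod-slots construction by a single greedy pass that repeatedly appends t // k for the remaining sum t and remaining part count k, with no divmod of the whole and no second pass.
import Mathlib
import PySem

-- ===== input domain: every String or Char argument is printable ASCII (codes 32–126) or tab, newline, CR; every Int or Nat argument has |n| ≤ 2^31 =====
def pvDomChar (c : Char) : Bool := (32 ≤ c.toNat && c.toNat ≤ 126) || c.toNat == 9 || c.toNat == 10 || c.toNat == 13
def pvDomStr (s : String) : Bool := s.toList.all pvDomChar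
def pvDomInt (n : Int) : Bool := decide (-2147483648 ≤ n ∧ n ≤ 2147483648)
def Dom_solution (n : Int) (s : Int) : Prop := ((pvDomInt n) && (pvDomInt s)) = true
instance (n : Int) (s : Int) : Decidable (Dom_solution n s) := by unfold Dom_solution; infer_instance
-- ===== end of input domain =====

-- B replaces A's uniform-list-then-increment loop by a single greedy pass appending t // k each step (alternative decomposition).


-- ===== PORT A =====
def solution (n : Int) (s : Int) : List Int :=
  if n > s then [-1]
  else
    -- int(s / n): ported as truncating integer division; exact on Dom, where |s|,|n| ≤ 2^31 < 2^53
    -- so the correctly rounded float quotient truncates to the true truncated quotient.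
    let dv := s.tdiv n
    let md := PySem.Int.mod s n
    let result := List.replicate n.toNat dv
    if md = 0 then result
    else
      (PySem.List.pyRange 1 (md + 1) 1).foldl
        (fun res i =>
          PySem.List.pySetD res ((res.length : Int) - i)
            (PySem.List.pyGetD res ((res.length : Int) - i) 0 + 1)) result

-- ===== PORT B =====
-- B's while-loop over (k, t); k decreases by one each iteration, so it recurses on k.toNat.
def solAltLoop : Nat → Int → List Int
  | 0, _ => []
  | k + 1, t =>
    let q := PySem.Int.floordiv t ((k : Int) + 1)
    q :: solAltLoop k (t - q)

def solution_alt (n : Int) (s : Int) : List Int :=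
  if n > s then [-1] else solAltLoop n.toNat s

-- ===== PRECONDITION & SPEC =====
-- Pre_ excludes exactly the inputs where Python A raises ZeroDivisionError: n = 0 with n ≤ s.
def Pre_solution (n : Int) (s : Int) : Prop := ¬ (n = 0 ∧ n ≤ s)
instance (n : Int) (s : Int) : Decidable (Pre_solution n s) := by unfold Pre_solution; infer_instance
def pvWitness_solution : Int × Int := (5, 12)

def Spec_solution (n : Int) (s : Int) (out : List Int) : Prop := out = solution_alt n s
instance (n : Int) (s : Int) (out : List Int) : Decidable (Spec_solution n s out) := by unfold Spec_solution; infer_instance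

-- ===== CLAIM (what is proved, stated in full; the proofs are below) =====
def Claim_equal_solution : Prop := ∀ (n : Int) (s : Int), Dom_solution n s → Pre_solution n s → Spec_solution n s (solution n s)

-- ===== LEMMAS AND PROOFS =====

-- Setting the last element of the first replicate block moves it to the second block.
lemma set_replicate_append (a m : Nat) (d v : Int) (ha : 1 ≤ a) :
    (List.replicate a d ++ List.replicate m v).set (a - 1) v
      = List.replicate (a - 1) d ++ List.replicate (m + 1) v := by
  obtain ⟨a', rfl⟩ : ∃ a', a = a' + 1 := ⟨a - 1, by omega⟩
  have h1 : List.replicate (a' + 1) d = List.replicate a' d ++ [d] := by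
    simp [List.replicate_succ' (n := a')]
  have h2 : List.replicate (m + 1) v = v :: List.replicate m v := List.replicate_succ ..
  simp only [h1, h2, List.append_assoc]
  rw [List.set_append_right _ _ (by simp)]
  simp

-- The loop of A: after folding over range(1, m+1), the last m slots are incremented.
lemma loop_lemma (d : Int) (nn m : Nat) (h : m ≤ nn) :
    (PySem.List.pyRange 1 ((m : Int) + 1) 1).foldl
        (fun res i =>
          PySem.List.pySetD res ((res.length : Int) - i)
            (PySem.List.pyGetD res ((res.length : Int) - i) 0 + 1))
        (List.replicate nn d)
      = List.replicate (nn - m) d ++ List.replicate m (d + 1) := by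
  induction m with
  | zero => simp
  | succ m ih =>
    have hm : m ≤ nn := by omega
    have hsplit : PySem.List.pyRange 1 ((m : Int) + 1 + 1) 1
        = PySem.List.pyRange 1 ((m : Int) + 1) 1 ++ [(m : Int) + 1] := by
      exact_mod_cast PySem.List.pyRange_one_succ_right (a := 1) (b := (m : Int) + 1) (by omega)
    rw [show ((m + 1 : Nat) : Int) + 1 = (m : Int) + 1 + 1 by push_cast; ring, hsplit,
      List.foldl_append, ih hm]
    have hlen : (List.replicate (nn - m) d ++ List.replicate m (d + 1)).length = nn := by
      simp; omega
    simp only [List.foldl_cons, List.foldl_nil, hlen]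
    have hidx : (nn : Int) - ((m : Int) + 1) = ((nn - m - 1 : Nat) : Int) := by omega
    rw [hidx, PySem.List.pySetD_natCast, PySem.List.pyGetD_natCast]
    have hget : (List.replicate (nn - m) d ++ List.replicate m (d + 1)).getD (nn - m - 1) 0 = d := by
      rw [List.getD_eq_getElem _ _ (by simp; omega)]
      rw [List.getElem_append_left (by simp; omega)]
      simp
    rw [hget]
    have := set_replicate_append (nn - m) m d (d + 1) (by omega)
    rw [show nn - m - 1 = (nn - m) - 1 from rfl, this]
    congr 1

-- B's greedy loop produces the two-segment form: for k parts summing to t = k*d + m (0 ≤ m < k),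
-- it emits n - m copies of d followed by m copies of d + 1.
lemma greedy_lemma (k : Nat) (d m : Int) (hm0 : 0 ≤ m) (hmk : m < (k : Int)) :
    solAltLoop k ((k : Int) * d + m)
      = List.replicate (k - m.toNat) d ++ List.replicate m.toNat (d + 1) := by
  induction k generalizing d m with
  | zero => omega
  | succ k ih =>
    simp only [solAltLoop]
    have hq : PySem.Int.floordiv ((((k : Nat) + 1 : Nat) : Int) * d + m) ((k : Int) + 1) = d := by
      rw [show (((k : Nat) + 1 : Nat) : Int) = (k : Int) + 1 by push_cast; ring]
      rw [PySem.Int.floordiv_eq_iff_of_pos (by omega)]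
      have hmk' : m < (k : Int) + 1 := by exact_mod_cast hmk
      constructor <;> nlinarith
    rw [hq]
    have hrest : (((k + 1 : Nat)) : Int) * d + m - d = (k : Int) * d + m := by push_cast; ring
    rw [hrest]
    by_cases hcase : m < (k : Int)
    · rw [ih d m hm0 hcase]
      have h1 : k + 1 - m.toNat = (k - m.toNat) + 1 := by omega
      rw [h1, List.replicate_succ]
      rfl
    · -- m = k: remaining sum is k*(d+1); all remaining parts get d + 1
      have hm : m = (k : Int) := by omega
      subst hm
      rcases Nat.eq_zero_or_pos k with hk | hk
      · subst hk; simp [solAltLoop]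
      · have h2 : (k : Int) * d + (k : Int) = (k : Int) * (d + 1) + 0 := by ring
        rw [h2, ih (d + 1) 0 le_rfl (by exact_mod_cast hk)]
        have : (k : Int).toNat = k := by omega
        simp [this, List.replicate_succ]

lemma main_lemma (n s : Int) (hpre : Pre_solution n s) : solution n s = solution_alt n s := by
  unfold solution solution_alt
  by_cases hns : n > s
  · simp [hns]
  · simp only [if_neg hns]
    rcases lt_trichotomy n 0 with hn | hn | hn
    · -- n < 0: both sides are []
      have hmd := PySem.Int.mod_neg_bounds (a := s) hn
      have hk : n.toNat = 0 := by omega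
      by_cases h0 : PySem.Int.mod s n = 0
      · simp [h0, hk, solAltLoop]
      · simp only [if_neg h0, hk, solAltLoop]
        rw [PySem.List.pyRange_one_eq_nil (by omega)]
        simp
    · exact absurd ⟨hn, not_lt.mp hns⟩ hpre
    · -- n > 0: s ≥ n > 0, so tdiv = floordiv, and both sides equal the two-segment form
      have hs : 0 ≤ s := le_trans (le_of_lt hn) (not_lt.mp hns)
      have hdv : s.tdiv n = PySem.Int.floordiv s n := by
        rw [PySem.Int.floordiv_eq_ediv_of_pos hn, Int.tdiv_eq_ediv_of_nonneg hs]
      have hmd0 : 0 ≤ PySem.Int.mod s n := PySem.Int.mod_nonneg s hn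
      have hmdn : PySem.Int.mod s n < n := PySem.Int.mod_lt s hn
      set md := PySem.Int.mod s n with hmd
      set dv := PySem.Int.floordiv s n with hdvdef
      have hsum : s = n * dv + md := by
        have := PySem.Int.floordiv_mul_add_mod s n
        rw [← hdvdef, ← hmd] at this; linarith [this]
      have hB : solAltLoop n.toNat s
          = List.replicate (n.toNat - md.toNat) dv ++ List.replicate md.toNat (dv + 1) := by
        have hn' : ((n.toNat : Nat) : Int) = n := by omega
        rw [show s = ((n.toNat : Nat) : Int) * dv + md by rw [hn']; exact hsum]
        exact greedy_lemma n.toNat dv md hmd0 (by omega)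
      by_cases h0 : md = 0
      · simp only [h0, hdv, if_pos]
        rw [hB, h0]
        simp
      · simp only [if_neg h0, hdv, hB]
        have hcast : md = ((md.toNat : Nat) : Int) := by omega
        rw [hcast, loop_lemma dv n.toNat md.toNat (by omega)]
        rw [Int.toNat_natCast]

-- ===== VERDICT (by name: the statement is the Claim_ definition above) =====
theorem solution_spec : Claim_equal_solution := by
  intro n s _ hpre
  unfold Spec_solution
  exact main_lemma n s hpre
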